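-- pv_equiv track=rewrite | github.com/mid-tp/project_Euler | python/problem46.py | prime_oddcomposite_list
-- ===== SOURCE A (Python) =====
-- import math
--
-- def isprime(num1):
--     for i in range(2,int(math.sqrt(num1))+1):
--         if (num1 % i) == 0:
--             break
--     else:
--         return num1
--
-- def prime_oddcomposite_list(num): #finally made an efficient prime lister less than N
--     primelist,oddcomposite_list= [],[]
--     for j in range(2,num):
--         if isprime(j)==j:
--             primelist.append(j)
--         else:
--             if (j%2)==0:
--                 pass
--             else:
--                 oddcomposite_list.append(j)
--
--     return primelist,oddcomposite_list
-- ===== SOURCE B (Python) =====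
-- def prime_oddcomposite_list(num):
--     # Sieve of Eratosthenes-style marking: cross out every j that has a divisor d
--     # with d*d <= j, then split the survivors (primes) from the odd crossed-out ones.
--     sieve = [True] * num
--     i = 2
--     while i * i < num:
--         for k in range(i * i, num, i):
--             sieve[k] = False
--         i += 1
--     primes = [j for j in range(2, num) if sieve[j]]
--     oddcomposites = [j for j in range(2, num) if j % 2 == 1 and not sieve[j]]
--     return primes, oddcomposites
-- ===== Notes on version B (the rewrite author's own statement) =====
-- stated objective: faster
-- what changed: Replaces per-number trial division (isprime for every j) by one shared sieve array built with multiple-marking, then two filtering passes over the range.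
import Mathlib
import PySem

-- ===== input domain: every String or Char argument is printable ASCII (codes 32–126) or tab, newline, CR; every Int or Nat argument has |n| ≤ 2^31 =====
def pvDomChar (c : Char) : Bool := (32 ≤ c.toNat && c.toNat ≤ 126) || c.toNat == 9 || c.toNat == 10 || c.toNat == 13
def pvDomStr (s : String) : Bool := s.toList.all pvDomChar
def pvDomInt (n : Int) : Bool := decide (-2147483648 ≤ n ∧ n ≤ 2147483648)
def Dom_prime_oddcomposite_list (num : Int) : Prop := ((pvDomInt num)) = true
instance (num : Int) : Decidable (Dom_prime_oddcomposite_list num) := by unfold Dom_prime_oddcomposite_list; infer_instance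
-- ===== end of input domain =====

-- B replaces A's per-number trial division by one shared sieve array (multiple-marking)
-- followed by two filtering passes; measurably faster on large num.


-- ===== PORT A =====
-- int(math.sqrt(num1)) is exact floor-sqrt for 0 ≤ num1 ≤ 2^31 (doubles are exact there);
-- isprime is only reached with num1 ≥ 2 inside the entry's loop.
def isprime (num1 : Int) : Option Int :=
  if (PySem.List.pyRange 2 ((Nat.sqrt num1.toNat : Int) + 1) 1).any
      (fun i => PySem.Int.mod num1 i == 0)
  then none            -- for-loop hit 'break': falls through, returns None
  else some num1       -- for-else: return num1

def prime_oddcomposite_list (num : Int) : List Int × List Int :=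
  (PySem.List.pyRange 2 num 1).foldl
    (fun acc j =>
      if isprime j == some j then (acc.1 ++ [j], acc.2)
      else if PySem.Int.mod j 2 == 0 then acc
      else (acc.1, acc.2 ++ [j]))
    ([], [])

-- ===== PORT B =====
-- used by sieveLoop's decreasing_by
theorem pvIntLtOfSqLt {i num : Int} (h : i * i < num) : i < num := by
  nlinarith [mul_self_nonneg i, mul_self_nonneg (i - 1)]

-- while i*i < num: mark sieve[k] = False for k in range(i*i, num, i)
def sieveLoop (num : Int) (s : List Bool) (i : Int) : List Bool :=
  if h : i * i < num then
    sieveLoop num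
      ((PySem.List.pyRange (i * i) num i).foldl (fun t k => t.set k.toNat false) s)
      (i + 1)
  else s
termination_by (num - i).toNat
decreasing_by have := pvIntLtOfSqLt h; omega

def prime_oddcomposite_list_alt (num : Int) : List Int × List Int :=
  let sieve := sieveLoop num (List.replicate num.toNat true) 2
  let primes := (PySem.List.pyRange 2 num 1).filter (fun j => sieve.getD j.toNat true)
  let oddcomposites := (PySem.List.pyRange 2 num 1).filter
    (fun j => (PySem.Int.mod j 2 == 1) && !(sieve.getD j.toNat true))
  (primes, oddcomposites)

-- ===== PRECONDITION & SPEC =====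
def Spec_prime_oddcomposite_list (num : Int) (out : List Int × List Int) : Prop := out = prime_oddcomposite_list_alt num
instance (num : Int) (out : List Int × List Int) : Decidable (Spec_prime_oddcomposite_list num out) := by unfold Spec_prime_oddcomposite_list; infer_instance

-- ===== CLAIM (what is proved, stated in full; the proofs are below) =====
def Claim_equal_prime_oddcomposite_list : Prop := ∀ (num : Int), Dom_prime_oddcomposite_list num → Spec_prime_oddcomposite_list num (prime_oddcomposite_list num)

-- ===== LEMMAS AND PROOFS =====

-- "j has a small divisor": the predicate both programs decide for each 2 ≤ j < num
def HasSmallDiv (j : Int) : Prop := ∃ d : Int, 2 ≤ d ∧ d * d ≤ j ∧ d ∣ j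

-- A's prime test decides ¬ HasSmallDiv
theorem isprime_iff (j : Int) (hj : 2 ≤ j) :
    ((isprime j == some j) = true) ↔ ¬ HasSmallDiv j := by
  unfold isprime HasSmallDiv
  by_cases hA : ((PySem.List.pyRange 2 ((Nat.sqrt j.toNat : Int) + 1) 1).any
      (fun i => PySem.Int.mod j i == 0)) = true
  · simp only [hA, if_true]
    constructor
    · intro h; exact absurd h (by simp)
    · intro h
      exfalso; apply h
      obtain ⟨i, hmem, hdiv⟩ := List.any_eq_true.mp hA
      rw [PySem.List.mem_pyRange_one] at hmem
      have hi2 : 2 ≤ i := hmem.1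
      have hisq : i ≤ (Nat.sqrt j.toNat : Int) := by omega
      have hnat : i.toNat ≤ Nat.sqrt j.toNat := by omega
      have hsq : i.toNat * i.toNat ≤ j.toNat := Nat.le_sqrt.mp hnat
      refine ⟨i, hi2, ?_, (PySem.Int.mod_eq_zero_iff_dvd j i).mp (by simpa using hdiv)⟩
      have h1 : (i.toNat : Int) = i := by omega
      have h2 : (j.toNat : Int) = j := by omega
      have h3 : ((i.toNat : Int)) * (i.toNat : Int) ≤ (j.toNat : Int) := by exact_mod_cast hsq
      rw [h1, h2] at h3
      exact h3
  · simp only [hA]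
    constructor
    · intro _ ⟨d, hd2, hdsq, hdvd⟩
      apply hA
      refine List.any_eq_true.mpr ⟨d, ?_, by simp [(PySem.Int.mod_eq_zero_iff_dvd j d).mpr hdvd]⟩
      rw [PySem.List.mem_pyRange_one]
      refine ⟨hd2, ?_⟩
      have hdn : d.toNat * d.toNat ≤ j.toNat := by
        have h1 : (d.toNat : Int) = d := by omega
        have h2 : (j.toNat : Int) = j := by omega
        have : (d.toNat : Int) * (d.toNat : Int) ≤ (j.toNat : Int) := by rw [h1, h2]; exact hdsq
        exact_mod_cast this
      have := Nat.le_sqrt.mpr hdn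
      omega
    · intro _; simp

-- marking pass: length is preserved
theorem foldl_set_length (l : List Int) (s : List Bool) :
    (l.foldl (fun t k => t.set k.toNat false) s).length = s.length := by
  induction l generalizing s with
  | nil => rfl
  | cons k l ih => simp [List.foldl_cons, ih]

-- marking pass: effect on one cell
theorem foldl_set_getD (l : List Int) (s : List Bool) (t : Nat) (ht : t < s.length) :
    ((l.foldl (fun t k => t.set k.toNat false) s).getD t true)
      = ((!l.any (fun k => k.toNat == t)) && s.getD t true) := by
  induction l generalizing s with
  | nil => simp
  | cons k l ih =>
      rw [List.foldl_cons, ih _ (by simpa using ht)]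
      simp only [List.any_cons, Bool.not_or]
      by_cases hk : k.toNat = t
      · subst hk
        simp [List.getD_eq_getElem?_getD, ht]
      · simp [List.getD_eq_getElem?_getD, hk, Bool.and_assoc]

-- sieve loop invariant
theorem sieveLoop_getD (num : Int) :
    ∀ (n : Nat) (i : Int) (s : List Bool), (num - i).toNat = n → 2 ≤ i →
    s.length = num.toNat →
    (∀ t : Nat, t < num.toNat →
      ((s.getD t true = true) ↔ ¬ ∃ d : Int, 2 ≤ d ∧ d < i ∧ d * d ≤ (t : Int) ∧ d ∣ (t : Int))) →
    ∀ t : Nat, t < num.toNat →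
      (((sieveLoop num s i).getD t true = true) ↔ ¬ HasSmallDiv (t : Int)) := by
  intro n
  induction n using Nat.strong_induction_on with
  | _ n ih =>
    intro i s hn hi hlen hinv t ht
    rw [sieveLoop]
    split
    case isTrue h =>
      have hlt : i < num := pvIntLtOfSqLt h
      refine ih (num - (i + 1)).toNat (by omega) (i + 1)
        ((PySem.List.pyRange (i * i) num i).foldl (fun t k => t.set k.toNat false) s)
        rfl (by omega) (by rw [foldl_set_length]; exact hlen) ?_ t ht
      intro u hu
      have hus : u < s.length := by omega
      rw [foldl_set_getD _ _ _ hus]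
      have hunum : (u : Int) < num := by omega
      have hany : ((PySem.List.pyRange (i * i) num i).any (fun k => k.toNat == u) = true)
          ↔ (i * i ≤ (u : Int) ∧ i ∣ (u : Int)) := by
        rw [List.any_eq_true]
        constructor
        · rintro ⟨k, hk, hke⟩
          rw [PySem.List.mem_pyRange_iff_of_pos (by omega)] at hk
          have hk0 : (0 : Int) ≤ k := by nlinarith [hk.1]
          have hku : k = (u : Int) := by
            have := beq_iff_eq.mp hke
            omega
          subst hku
          obtain ⟨hk1, _, hk3⟩ := hk
          refine ⟨hk1, ?_⟩
          have h4 : i ∣ ((u : Int) - i * i) + i * i := dvd_add hk3 ⟨i, rfl⟩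
          simpa using h4
        · rintro ⟨h1, h2⟩
          refine ⟨(u : Int), ?_, by simp⟩
          rw [PySem.List.mem_pyRange_iff_of_pos (by omega)]
          exact ⟨h1, hunum, dvd_sub h2 ⟨i, rfl⟩⟩
      have hinvu := hinv u hu
      constructor
      · intro hgd
        rw [Bool.and_eq_true, Bool.not_eq_eq_eq_not, Bool.not_true] at hgd
        rintro ⟨d, hd2, hdlt, hdsq, hddvd⟩
        rcases (by omega : d < i ∨ d = i) with hcase | hcase
        · exact (hinvu.mp hgd.2) ⟨d, hd2, hcase, hdsq, hddvd⟩
        · subst hcase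
          have : ((PySem.List.pyRange (d * d) num d).any (fun k => k.toNat == u)) = true :=
            hany.mpr ⟨hdsq, hddvd⟩
          rw [this] at hgd
          exact absurd hgd.1 (by simp)
      · intro hno
        have h1 : ¬ (i * i ≤ (u : Int) ∧ i ∣ (u : Int)) := by
          rintro ⟨ha, hb⟩
          exact hno ⟨i, hi, by omega, ha, hb⟩
        have h2 : s.getD u true = true := hinvu.mpr (by
          rintro ⟨d, hd2, hdlt, hdsq, hddvd⟩
          exact hno ⟨d, hd2, by omega, hdsq, hddvd⟩)
        rw [h2]
        simp only [Bool.and_true, Bool.not_eq_eq_eq_not, Bool.not_true]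
        rw [← Bool.not_eq_true]
        intro hc
        exact h1 (hany.mp hc)
    case isFalse h =>
      rw [hinv t ht]
      unfold HasSmallDiv
      constructor
      · rintro hno ⟨d, hd2, hdsq, hddvd⟩
        have htn : (t : Int) < num := by omega
        have hdi : d < i := by nlinarith
        exact hno ⟨d, hd2, hdi, hdsq, hddvd⟩
      · rintro hno ⟨d, hd2, _, hdsq, hddvd⟩
        exact hno ⟨d, hd2, hdsq, hddvd⟩

-- B's sieve cell decides ¬ HasSmallDiv
theorem sieve_getD_iff (num : Int) (t : Nat) (ht : t < num.toNat) :
    (((sieveLoop num (List.replicate num.toNat true) 2).getD t true = true)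
      ↔ ¬ HasSmallDiv (t : Int)) := by
  refine sieveLoop_getD num (num - 2).toNat 2 _ rfl le_rfl (by simp) ?_ t ht
  intro u hu
  simp only [List.getD_eq_getElem?_getD, List.getElem?_replicate, hu, if_pos]
  constructor
  · rintro _ ⟨d, hd2, hdi, _⟩; omega
  · intro _; simp

-- A's fold builds the two filters
theorem foldA (l : List Int) :
    ∀ (as bs : List Int),
    (l.foldl
      (fun acc j =>
        if isprime j == some j then (acc.1 ++ [j], acc.2)
        else if PySem.Int.mod j 2 == 0 then acc
        else (acc.1, acc.2 ++ [j]))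
      (as, bs))
    = (as ++ l.filter (fun j => isprime j == some j),
       bs ++ l.filter (fun j => (!(isprime j == some j)) && !(PySem.Int.mod j 2 == 0))) := by
  induction l with
  | nil => simp
  | cons j l ih =>
      intro as bs
      simp only [List.foldl_cons, List.filter_cons]
      by_cases hp : (isprime j == some j) = true
      · simp only [hp, if_true, ih]
        simp
      · by_cases he : (PySem.Int.mod j 2 == 0) = true
        · simp only [hp, he, if_true, ih]
          simp
        · simp only [hp, he, ih]
          simp

-- ===== VERDICT (by name: the statement is the Claim_ definition above) =====
-- pointwise agreement of the two prime tests on 2 ≤ j < num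
theorem prime_test_eq (num j : Int) (hj : j ∈ PySem.List.pyRange 2 num 1) :
    (isprime j == some j)
      = (sieveLoop num (List.replicate num.toNat true) 2).getD j.toNat true := by
  rw [PySem.List.mem_pyRange_one] at hj
  have hcast : ((j.toNat : Int)) = j := by omega
  have hB := sieve_getD_iff num j.toNat (by omega)
  rw [hcast] at hB
  exact Bool.eq_iff_iff.mpr ((isprime_iff j hj.1).trans hB.symm)

theorem prime_oddcomposite_list_spec : Claim_equal_prime_oddcomposite_list := by
  intro num _
  unfold Spec_prime_oddcomposite_list prime_oddcomposite_list prime_oddcomposite_list_alt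
  rw [foldA]
  simp only [List.nil_append]
  refine Prod.ext ?_ ?_
  · exact List.filter_congr (fun j hj => prime_test_eq num j hj)
  · refine List.filter_congr (fun j hj => ?_)
    rw [← prime_test_eq num j hj]
    rcases PySem.Int.mod_two_eq j with he | he <;>
      cases hp : (isprime j == some j) <;>
        simp only [he] <;> simp
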